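-- pv_equiv track=rewrite | github.com/michellealzola/PYTHON_Obourn_Chap08_Dictionaries_and_Sets | is_1_to_1.py | is_1_to_1
-- ===== SOURCE A (Python) =====
-- def is_1_to_1(phonebook):
--     phone_numbers = set()
--     for v in phonebook.values():
--         phone_numbers.add(v)
--     if len(phonebook) > len(phone_numbers):
--         return False
--     else:
--         return True
-- ===== SOURCE B (Python) =====
-- def _no_adjacent_dups(vals):
--     if len(vals) < 2:
--         return True
--     if vals[0] == vals[1]:
--         return False
--     return _no_adjacent_dups(vals[1:])
--
--
-- def is_1_to_1(phonebook):
--     return _no_adjacent_dups(sorted(phonebook.values()))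
-- ===== Notes on version B (the rewrite author's own statement) =====
-- stated objective: alternative
-- what changed: Replaces A's hash-set cardinality comparison with a sort of the values followed by a recursive adjacent-equality scan: duplicates, if any, become neighbours after sorting, so no set is built at all.
import Mathlib
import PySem

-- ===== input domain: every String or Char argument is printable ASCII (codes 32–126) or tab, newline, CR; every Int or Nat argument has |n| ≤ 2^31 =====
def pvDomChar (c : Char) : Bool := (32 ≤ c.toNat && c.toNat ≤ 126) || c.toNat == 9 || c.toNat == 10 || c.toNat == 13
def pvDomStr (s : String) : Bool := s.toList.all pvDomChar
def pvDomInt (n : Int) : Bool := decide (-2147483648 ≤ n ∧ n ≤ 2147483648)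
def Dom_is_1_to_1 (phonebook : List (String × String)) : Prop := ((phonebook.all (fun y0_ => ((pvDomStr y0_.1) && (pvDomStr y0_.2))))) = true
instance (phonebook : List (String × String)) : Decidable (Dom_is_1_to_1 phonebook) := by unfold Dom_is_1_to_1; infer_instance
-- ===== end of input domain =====

-- B replaces A's hash-set cardinality check by sorting the values and recursively
-- scanning adjacent pairs for a duplicate; alternative algorithm, no set is built.

-- ===== PORT A =====
-- phone_numbers = set(); for v in phonebook.values(): phone_numbers.add(v);
-- return not (len(phonebook) > len(phone_numbers))
def is_1_to_1 (phonebook : List (String × String)) : Bool :=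
  let phone_numbers : PySem.Set String :=
    ((PySem.Dict.mk phonebook).values).foldl (fun s v => PySem.Set.add s v) PySem.Set.empty
  if phonebook.length > phone_numbers.length then false else true

-- ===== PORT B =====
-- _no_adjacent_dups(vals): recursion on the sorted value list, vals[1:] = the tail
def noAdjacentDups : List String → Bool
  | a :: b :: rest => if a == b then false else noAdjacentDups (b :: rest)
  | _ => true

-- return _no_adjacent_dups(sorted(phonebook.values()))
def is_1_to_1_alt (phonebook : List (String × String)) : Bool :=
  noAdjacentDups (PySem.List.sorted ((PySem.Dict.mk phonebook).values) (fun x => x) false)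

-- ===== PRECONDITION & SPEC =====
def Spec_is_1_to_1 (phonebook : List (String × String)) (out : Bool) : Prop := out = is_1_to_1_alt phonebook
instance (phonebook : List (String × String)) (out : Bool) : Decidable (Spec_is_1_to_1 phonebook out) := by unfold Spec_is_1_to_1; infer_instance

-- ===== CLAIM (what is proved, stated in full; the proofs are below) =====
def Claim_equal_is_1_to_1 : Prop := ∀ (phonebook : List (String × String)), Dom_is_1_to_1 phonebook → Spec_is_1_to_1 phonebook (is_1_to_1 phonebook)

-- ===== LEMMAS AND PROOFS =====

-- the set built by the fold never grows past seen.length + vs.length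
theorem pv_len_fold_le (vs : List String) : ∀ (seen : PySem.Set String),
    (vs.foldl (fun s v => PySem.Set.add s v) seen).length ≤ seen.length + vs.length := by
  induction vs with
  | nil => intro seen; simp
  | cons v rest ih =>
    intro seen
    simp only [List.foldl_cons, List.length_cons]
    calc (rest.foldl (fun s v => PySem.Set.add s v) (PySem.Set.add seen v)).length
        ≤ (PySem.Set.add seen v).length + rest.length := ih _
      _ ≤ seen.length + (rest.length + 1) := by
          simp only [PySem.Set.add]
          split <;> simp <;> try omega

-- the fold adds one element per value exactly when the values are distinct and fresh
theorem pv_fold_len_iff (vs : List String) : ∀ (seen : PySem.Set String),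
    ((vs.foldl (fun s v => PySem.Set.add s v) seen).length = seen.length + vs.length
      ↔ (vs.Nodup ∧ ∀ x ∈ vs, x ∉ seen)) := by
  induction vs with
  | nil => intro seen; simp
  | cons v rest ih =>
    intro seen
    simp only [List.foldl_cons, List.length_cons]
    by_cases h : PySem.Set.contains seen v = true
    · have hv : v ∈ seen := (PySem.Set.contains_iff _ _).mp h
      have hadd : PySem.Set.add seen v = seen := by simp [PySem.Set.add, hv]
      rw [hadd]
      have hle := pv_len_fold_le rest seen
      constructor
      · intro hlen; omega
      · rintro ⟨-, hf⟩; exact absurd hv (hf v (by simp))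
    · have hv : v ∉ seen := fun hm => h ((PySem.Set.contains_iff _ _).mpr hm)
      have hadd : PySem.Set.add seen v = seen ++ [v] := by simp [PySem.Set.add, hv]
      rw [hadd]
      have hih := ih (seen ++ [v])
      simp only [List.length_append, List.length_singleton] at hih
      rw [show seen.length + (rest.length + 1) = (seen.length + 1) + rest.length by omega, hih]
      simp only [List.nodup_cons, List.mem_cons, List.mem_append,
        List.not_mem_nil, or_false]
      constructor
      · rintro ⟨hnd, hf⟩
        refine ⟨⟨fun hvr => hf v hvr (Or.inr rfl), hnd⟩, ?_⟩
        rintro x (rfl | hx)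
        · exact hv
        · intro hxs; exact hf x hx (Or.inl hxs)
      · rintro ⟨⟨hvr, hnd⟩, hf⟩
        refine ⟨hnd, fun x hx hxm => ?_⟩
        rcases hxm with hxs | rfl
        · exact hf x (Or.inr hx) hxs
        · exact hvr hx

-- port A answers true exactly when the value list has no duplicates
theorem pv_A_iff (phonebook : List (String × String)) :
    is_1_to_1 phonebook = true ↔ ((PySem.Dict.mk phonebook).values).Nodup := by
  unfold is_1_to_1
  have hlen : ((PySem.Dict.mk phonebook).values).length = phonebook.length := by
    simp [PySem.Dict.values]
  have hiff := pv_fold_len_iff ((PySem.Dict.mk phonebook).values) PySem.Set.empty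
  have hle := pv_len_fold_le ((PySem.Dict.mk phonebook).values) PySem.Set.empty
  simp only [PySem.Set.empty, List.length_nil, Nat.zero_add, List.not_mem_nil,
    not_false_iff, imp_true_iff, and_true] at hiff hle
  constructor
  · intro htrue
    by_contra hnd
    have hne : (((PySem.Dict.mk phonebook).values).foldl (fun s v => PySem.Set.add s v) []).length
        ≠ ((PySem.Dict.mk phonebook).values).length := fun hL => hnd (hiff.mp hL)
    have : phonebook.length >
        (((PySem.Dict.mk phonebook).values).foldl (fun s v => PySem.Set.add s v) []).length := by omega
    simp only [PySem.Set.empty] at htrue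
    rw [if_pos this] at htrue
    exact Bool.false_ne_true htrue
  · intro hnd
    have hL := hiff.mpr hnd
    have : ¬ (phonebook.length >
        (((PySem.Dict.mk phonebook).values).foldl (fun s v => PySem.Set.add s v) []).length) := by omega
    simp only [PySem.Set.empty]
    rw [if_neg this]

-- on a ≤-sorted list the adjacent scan detects exactly the duplicates
theorem pv_noAdj_iff (l : List String) (hp : l.Pairwise (· ≤ ·)) :
    noAdjacentDups l = true ↔ l.Nodup := by
  induction l with
  | nil => simp [noAdjacentDups]
  | cons a t ih =>
    cases t with
    | nil => simp [noAdjacentDups]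
    | cons b rest =>
      have hp' : (b :: rest).Pairwise (· ≤ ·) := hp.tail
      have hab : a ≤ b := (List.pairwise_cons.mp hp).1 b (by simp)
      by_cases hEq : a = b
      · subst hEq
        simp [noAdjacentDups]
      · have hbeq : (a == b) = false := by simp [hEq]
        simp only [noAdjacentDups, hbeq, Bool.false_eq_true, if_false, ih hp']
        have hnotmem : a ∉ b :: rest := by
          intro hm
          rcases List.mem_cons.mp hm with rfl | hm'
          · exact hEq rfl
          · have hb : b ≤ a := (List.pairwise_cons.mp hp').1 a hm'
            exact hEq (le_antisymm hab hb)
        simp [List.nodup_cons, hnotmem]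

-- port B answers true exactly when the value list has no duplicates
theorem pv_B_iff (phonebook : List (String × String)) :
    is_1_to_1_alt phonebook = true ↔ ((PySem.Dict.mk phonebook).values).Nodup := by
  unfold is_1_to_1_alt
  have hperm := PySem.List.sorted_perm ((PySem.Dict.mk phonebook).values) (fun x => x) false
  have hp := PySem.List.sorted_pairwise ((PySem.Dict.mk phonebook).values) (fun x => x)
  rw [pv_noAdj_iff _ hp]
  exact hperm.nodup_iff

-- ===== VERDICT (by name: the statement is the Claim_ definition above) =====
theorem is_1_to_1_spec : Claim_equal_is_1_to_1 := by
  intro phonebook _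
  unfold Spec_is_1_to_1
  have hA := pv_A_iff phonebook
  have hB := pv_B_iff phonebook
  cases hA' : is_1_to_1 phonebook <;> cases hB' : is_1_to_1_alt phonebook <;> simp_all
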